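-- pv_equiv track=rewrite | github.com/tetiana-oprysk/epam_homework | nkezsbdj-python_online_task_4_exercise_6/task_4_ex_6.py | get_longest_word
-- ===== SOURCE A (Python) =====
-- def get_longest_word(str_to_parse: str) -> str:
--     arr = []
--     if not isinstance(str_to_parse, str):
--         raise ValueError
--     else:
--         split_str = str_to_parse.split()
--         for i in split_str:
--             arr.append(len(i))
--         max_len = max(arr)
--         for i in split_str:
--             if len(i) == max_len:
--                 return i
-- ===== SOURCE B (Python) =====
-- def get_longest_word(str_to_parse: str) -> str:
--     # Char-level scan: no split(), no intermediate word list. Walk the string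
--     # once, jump over each word with an inner loop, keep the first longest.
--     if not isinstance(str_to_parse, str):
--         raise ValueError
--     best = None
--     i = 0
--     n = len(str_to_parse)
--     while i < n:
--         if str_to_parse[i].isspace():
--             i += 1
--         else:
--             j = i
--             while j < n and not str_to_parse[j].isspace():
--                 j += 1
--             if best is None or j - i > len(best):
--                 best = str_to_parse[i:j]
--             i = j
--     if best is None:
--         raise ValueError("no words")
--     return best
-- ===== Notes on version B (the rewrite author's own statement) =====
-- stated objective: alternative
-- what changed: A splits the string into a word list, builds a parallel list of lengths, takes its max, then rescans the words for the first of that length; B never calls split(): it scans the string character by character, jumps over each word with an inner loop and keeps the first longest word seen.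
import Mathlib
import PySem

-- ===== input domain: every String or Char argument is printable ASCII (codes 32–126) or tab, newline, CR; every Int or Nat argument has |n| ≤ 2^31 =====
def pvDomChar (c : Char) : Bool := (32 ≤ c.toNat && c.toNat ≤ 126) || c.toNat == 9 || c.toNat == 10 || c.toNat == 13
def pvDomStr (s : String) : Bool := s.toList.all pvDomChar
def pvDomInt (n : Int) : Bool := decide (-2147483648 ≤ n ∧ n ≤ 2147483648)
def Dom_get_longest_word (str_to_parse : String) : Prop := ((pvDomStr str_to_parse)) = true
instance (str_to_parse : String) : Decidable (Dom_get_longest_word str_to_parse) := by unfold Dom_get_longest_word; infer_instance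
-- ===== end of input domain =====

-- B replaces A's split()+lengths-list+max+rescan by one char-level scan of the
-- string that jumps over each word and keeps the first longest; equivalence is
-- on the return value.

-- ===== PORT A =====
-- second loop of A: return the first word whose length equals max_len
def pvFindFirst (split_str : List String) (max_len : Int) : String :=
  match split_str with
  | [] => ""   -- A falls off the end (returns None); unreachable: some word has the max length
  | i :: rest => if PySem.Str.len i = max_len then i else pvFindFirst rest max_len

def get_longest_word (str_to_parse : String) : String :=
  let split_str := PySem.Str.split₀ str_to_parse
  let arr := split_str.foldl (fun acc i => acc ++ [PySem.Str.len i]) ([] : List Int)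
  match PySem.List.max? arr (fun x => x) with   -- max(arr); none = ValueError, excluded by Pre_
  | none => ""
  | some max_len => pvFindFirst split_str max_len

-- ===== PORT B =====
-- the outer while loop of Source B, recursing on the characters still ahead of index i;
-- the inner while loop (advance j to the next whitespace char) is takeWhile/dropWhile
-- on those characters — exact, both stop at the first whitespace char — and
-- str_to_parse[i:j] is exactly the takeWhile chunk
def pvWordScan (cs : List Char) (best : Option (List Char)) : Option (List Char) :=
  match cs with
  | [] => best
  | c :: rest =>
    if PySem.Chars.isspace c then
      pvWordScan rest best
    else
      let w := c :: rest.takeWhile (fun d => !PySem.Chars.isspace d)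
      let best' := match best with
        | none => some w
        | some b => if b.length < w.length then some w else some b   -- j - i > len(best)
      pvWordScan (rest.dropWhile (fun d => !PySem.Chars.isspace d)) best'
  termination_by cs.length
  decreasing_by
    · simp
    · have := List.length_dropWhile_le (fun d => !PySem.Chars.isspace d) rest
      simp; omega

def get_longest_word_alt (str_to_parse : String) : String :=
  match pvWordScan str_to_parse.toList none with
  | some w => String.ofList w
  | none => ""   -- best is None: Source B raises ValueError, excluded by Pre_

-- ===== PRECONDITION & SPEC =====
-- A (max on the empty lengths list) raises ValueError exactly when the string has no words.
def Pre_get_longest_word (str_to_parse : String) : Prop := PySem.Str.split₀ str_to_parse ≠ []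
instance (str_to_parse : String) : Decidable (Pre_get_longest_word str_to_parse) := by unfold Pre_get_longest_word; infer_instance
def pvWitness_get_longest_word : String := "hello big world"

def Spec_get_longest_word (str_to_parse : String) (out : String) : Prop := out = get_longest_word_alt str_to_parse
instance (str_to_parse : String) (out : String) : Decidable (Spec_get_longest_word str_to_parse out) := by unfold Spec_get_longest_word; infer_instance

-- ===== CLAIM (what is proved, stated in full; the proofs are below) =====
def Claim_equal_get_longest_word : Prop := ∀ (str_to_parse : String), Dom_get_longest_word str_to_parse → Pre_get_longest_word str_to_parse → Spec_get_longest_word str_to_parse (get_longest_word str_to_parse)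

-- ===== LEMMAS AND PROOFS =====

-- the word list that split() produces, written as the same jump recursion B's scan makes
def pvWords (cs : List Char) : List (List Char) :=
  match cs with
  | [] => []
  | c :: rest =>
    if PySem.Chars.isspace c then pvWords rest
    else (c :: rest.takeWhile (fun d => !PySem.Chars.isspace d))
           :: pvWords (rest.dropWhile (fun d => !PySem.Chars.isspace d))
  termination_by cs.length
  decreasing_by
    · simp
    · have := List.length_dropWhile_le (fun d => !PySem.Chars.isspace d) rest
      simp; omega

lemma split₀_go_eq_words (cs : List Char) (cur : List Char) (acc : List (List Char)) :
    PySem.Chars.split₀.go cs cur acc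
      = acc.reverse ++ (if cur.isEmpty then pvWords cs
          else (cur.reverse ++ cs.takeWhile (fun d => !PySem.Chars.isspace d))
                 :: pvWords (cs.dropWhile (fun d => !PySem.Chars.isspace d))) := by
  induction cs generalizing cur acc with
  | nil =>
    by_cases h : cur.isEmpty <;>
      simp [PySem.Chars.split₀.go, pvWords, h]
  | cons c rest ih =>
    by_cases hs : PySem.Chars.isspace c
    · by_cases h : cur.isEmpty
      · simp only [PySem.Chars.split₀.go, hs, if_pos h, if_true]
        rw [ih [] acc]
        simp [pvWords, hs]
      · simp only [PySem.Chars.split₀.go, hs, if_neg h, if_true]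
        rw [ih [] (cur.reverse :: acc)]
        simp [pvWords, hs, List.takeWhile, List.dropWhile]
    · simp only [PySem.Chars.split₀.go, hs]
      rw [ih (c :: cur) acc]
      by_cases h : cur.isEmpty
      · have : cur = [] := by cases cur <;> simp_all
        subst this
        simp [pvWords, hs]
      · simp [hs, h, List.takeWhile, List.dropWhile]

lemma split₀_eq_words (cs : List Char) : PySem.Chars.split₀ cs = pvWords cs := by
  simpa using split₀_go_eq_words cs [] []

lemma str_split₀_eq_words (s : String) :
    PySem.Str.split₀ s = (pvWords s.toList).map String.ofList := by
  show (PySem.Chars.split₀ s.toList).map String.ofList = _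
  rw [split₀_eq_words]

-- fold form of B's scan over the word list
def pvFoldBest (best : Option (List Char)) (ws : List (List Char)) : Option (List Char) :=
  match ws with
  | [] => best
  | w :: t =>
    pvFoldBest (match best with
      | none => some w
      | some b => if b.length < w.length then some w else some b) t

lemma wordScan_eq_foldBest (cs : List Char) (best : Option (List Char)) :
    pvWordScan cs best = pvFoldBest best (pvWords cs) := by
  induction cs, best using pvWordScan.induct with
  | case1 => simp [pvWordScan, pvWords, pvFoldBest]
  | case2 c rest b hs ih => simp only [pvWordScan, pvWords, hs, if_true]; exact ih
  | case3 c rest b hs w best' ih =>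
    simp only [pvWordScan, pvWords, hs]
    exact ih

-- plain recursive running max on char lists (first among ties)
def pvMaxRunC (a : List Char) (ws : List (List Char)) : List Char :=
  match ws with
  | [] => a
  | x :: t => if a.length < x.length then pvMaxRunC x t else pvMaxRunC a t

lemma foldBest_some (ws : List (List Char)) (a : List Char) :
    pvFoldBest (some a) ws = some (pvMaxRunC a ws) := by
  induction ws generalizing a with
  | nil => rfl
  | cons x t ih =>
    simp only [pvFoldBest, pvMaxRunC]
    split_ifs with h
    · exact ih x
    · exact ih a

-- plain recursive form of the running max on strings (A's side, from the rescan)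
def pvMaxRun (a : String) (ws : List String) : String :=
  match ws with
  | [] => a
  | x :: t => if PySem.Str.len a < PySem.Str.len x then pvMaxRun x t else pvMaxRun a t

lemma maxRun_map_ofList (ws : List (List Char)) (a : List Char) :
    pvMaxRun (String.ofList a) (ws.map String.ofList) = String.ofList (pvMaxRunC a ws) := by
  induction ws generalizing a with
  | nil => rfl
  | cons x t ih =>
    simp only [List.map, pvMaxRun, pvMaxRunC, PySem.Str.len_eq, String.toList_ofList]
    split_ifs with h h' h'
    · exact ih x
    · omega
    · omega
    · exact ih a

lemma max?_int_cons_eq_maxRun (ws : List String) (a : String) :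
    PySem.List.max? (PySem.Str.len a :: ws.map PySem.Str.len) (fun x => x)
      = some (PySem.Str.len (pvMaxRun a ws)) := by
  induction ws generalizing a with
  | nil => rfl
  | cons x t ih =>
    simp only [PySem.List.max?, List.foldl, List.map, pvMaxRun, PySem.Str.len_eq] at ih ⊢
    split_ifs with h
    · exact ih x
    · exact ih a

-- the running max is the FIRST word of maximal length: A's rescan recovers exactly it
lemma maxRun_first (ws : List String) (a : String) :
    (pvMaxRun a ws = a ∧ ∀ y ∈ ws, PySem.Str.len y ≤ PySem.Str.len a)
    ∨ (PySem.Str.len a < PySem.Str.len (pvMaxRun a ws)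
       ∧ pvFindFirst ws (PySem.Str.len (pvMaxRun a ws)) = pvMaxRun a ws) := by
  induction ws generalizing a with
  | nil => exact Or.inl ⟨rfl, by simp⟩
  | cons x t ih =>
    simp only [pvMaxRun]
    split_ifs with h
    · rcases ih x with ⟨he, hb⟩ | ⟨hl, hf⟩
      · refine Or.inr ⟨by rw [he]; exact h, ?_⟩
        simp [pvFindFirst, he]
      · refine Or.inr ⟨lt_trans h hl, ?_⟩
        simp only [pvFindFirst]
        rw [if_neg (by omega)]
        exact hf
    · rcases ih a with ⟨he, hb⟩ | ⟨hl, hf⟩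
      · exact Or.inl ⟨he, by
          intro y hy
          rcases List.mem_cons.mp hy with rfl | hy
          · omega
          · exact hb y hy⟩
      · refine Or.inr ⟨hl, ?_⟩
        simp only [pvFindFirst]
        rw [if_neg (by omega)]
        exact hf

lemma findFirst_cons_maxRun (t : List String) (x : String) :
    pvFindFirst (x :: t) (PySem.Str.len (pvMaxRun x t)) = pvMaxRun x t := by
  rcases maxRun_first t x with ⟨he, _⟩ | ⟨hl, hf⟩
  · simp [pvFindFirst, he]
  · simp only [pvFindFirst]
    rw [if_neg (by omega)]
    exact hf

-- ===== VERDICT (by name: the statement is the Claim_ definition above) =====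
theorem get_longest_word_spec : Claim_equal_get_longest_word := by
  intro s _hdom hpre
  unfold Pre_get_longest_word at hpre
  rw [str_split₀_eq_words] at hpre
  obtain ⟨w, ws, hsplit⟩ : ∃ w ws, pvWords s.toList = w :: ws := by
    cases h : pvWords s.toList with
    | nil => rw [h] at hpre; simp at hpre
    | cons w ws => exact ⟨w, ws, rfl⟩
  unfold Spec_get_longest_word
  simp only [get_longest_word, get_longest_word_alt, str_split₀_eq_words,
    hsplit, List.map_cons,
    PySem.List.foldl_append_singleton_eq_map, List.nil_append,
    wordScan_eq_foldBest, pvFoldBest, foldBest_some]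
  rw [max?_int_cons_eq_maxRun]
  show pvFindFirst (String.ofList w :: List.map String.ofList ws)
        (PySem.Str.len (pvMaxRun (String.ofList w) (List.map String.ofList ws)))
      = String.ofList (pvMaxRunC w ws)
  rw [findFirst_cons_maxRun, maxRun_map_ofList]
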